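-- pv_equiv track=rewrite | github.com/juren53/HST-Metadata | Photos/Version-2/Framework/tests/acceptance/conftest.py | apply_mojibake_fixes
-- ===== SOURCE A (Python) =====
-- def apply_mojibake_fixes(rows: list[dict], edits: dict[int, dict]) -> list[dict]:
--     """
--     Mirror of Step3Dialog._apply_fixes() write-back logic.
--
--     Args:
--         rows:  list of row dicts (header excluded), as read by csv.DictReader.
--         edits: {row_num: {field: new_value}} — same structure as self.edits.
--
--     Returns:
--         New list of row dicts with edits applied.
--     """
--     import copy
--
--     result = copy.deepcopy(rows)
--     for row_num, field_edits in edits.items():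
--         data_index = row_num - 2          # row_num 2 → index 0
--         if 0 <= data_index < len(result):
--             for field, new_value in field_edits.items():
--                 result[data_index][field] = new_value
--     return result
-- ===== SOURCE B (Python) =====
-- def apply_mojibake_fixes(rows: list[dict], edits: dict[int, dict]) -> list[dict]:
--     """Same write-back as A, but iterating the dense rows and looking up the
--     sparse edits dict, instead of iterating edits with a bounds check."""
--     import copy
--
--     result = []
--     for index, row in enumerate(copy.deepcopy(rows)):
--         field_edits = edits.get(index + 2)
--         if field_edits is not None:
--             for field, new_value in field_edits.items():
--                 row[field] = new_value
--         result.append(row)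
--     return result
-- ===== Notes on version B (the rewrite author's own statement) =====
-- stated objective: alternative
-- what changed: B inverts the loop structure: instead of iterating the edits dict and bounds-checking each row index, it enumerates the rows and looks each row number up in the edits dict, so no bounds check is needed.
import Mathlib
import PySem

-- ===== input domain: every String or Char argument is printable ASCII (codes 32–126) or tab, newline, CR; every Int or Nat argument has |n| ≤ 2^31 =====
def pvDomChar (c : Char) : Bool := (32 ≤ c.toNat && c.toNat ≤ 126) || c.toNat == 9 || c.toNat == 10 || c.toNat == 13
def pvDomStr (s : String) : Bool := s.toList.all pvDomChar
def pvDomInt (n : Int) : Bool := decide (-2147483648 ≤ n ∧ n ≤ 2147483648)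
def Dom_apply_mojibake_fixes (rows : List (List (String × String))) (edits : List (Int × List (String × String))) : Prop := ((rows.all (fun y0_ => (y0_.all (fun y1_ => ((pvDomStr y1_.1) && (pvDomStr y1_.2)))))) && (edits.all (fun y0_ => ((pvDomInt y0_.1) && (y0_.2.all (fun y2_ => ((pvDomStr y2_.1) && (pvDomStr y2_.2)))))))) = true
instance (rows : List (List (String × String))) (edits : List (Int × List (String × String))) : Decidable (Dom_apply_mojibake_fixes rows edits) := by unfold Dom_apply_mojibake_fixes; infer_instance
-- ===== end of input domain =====

-- B inverts A's loop structure: it enumerates the rows and looks each row number up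
-- in the edits dict, instead of iterating the edits with an explicit bounds check.
-- Equivalence of the RETURN values is proved (A copies, so neither mutates its input).

-- ===== PORT A =====
-- inner loop 'for field, new_value in field_edits.items(): row[field] = new_value'
-- (dict assignment = PySem.Dict.insert, overwrite in place); shared by both ports
-- because both Pythons contain this loop verbatim.
def pvWriteFields (row : List (String × String)) (fes : List (String × String)) : List (String × String) :=
  (fes.foldl (fun d p => d.insert p.1 p.2) (PySem.Dict.mk row)).items

-- A's loop body over one edits entry (bounds check, then the inner write loop)
def pvStep (result : List (List (String × String))) (p : Int × List (String × String)) : List (List (String × String)) :=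
  if 0 ≤ p.1 - 2 ∧ p.1 - 2 < (result.length : Int) then
    result.set (p.1 - 2).toNat (pvWriteFields (result.getD (p.1 - 2).toNat []) p.2)
  else result

def apply_mojibake_fixes (rows : List (List (String × String))) (edits : List (Int × List (String × String))) : List (List (String × String)) :=
  edits.foldl pvStep rows

-- ===== PORT B =====
def apply_mojibake_fixes_alt (rows : List (List (String × String))) (edits : List (Int × List (String × String))) : List (List (String × String)) :=
  rows.mapIdx (fun index row =>
    match (PySem.Dict.mk edits).get? ((index : Int) + 2) with
    | some fes => pvWriteFields row fes
    | none => row)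

-- ===== PRECONDITION & SPEC =====
-- Pre_ requires the row-number keys of `edits` to be pairwise distinct: `edits` is a
-- Python dict, whose keys are necessarily distinct, so this excludes no Python input;
-- it only rules out association lists that do not represent a dict.
def Pre_apply_mojibake_fixes (rows : List (List (String × String))) (edits : List (Int × List (String × String))) : Prop :=
  (edits.map Prod.fst).Nodup
instance (rows : List (List (String × String))) (edits : List (Int × List (String × String))) : Decidable (Pre_apply_mojibake_fixes rows edits) := by unfold Pre_apply_mojibake_fixes; infer_instance

def pvWitness_apply_mojibake_fixes : (List (List (String × String))) × (List (Int × List (String × String))) :=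
  ([[("a", "x"), ("b", "y")], [("a", "z")]], [(2, [("a", "u")]), (5, [("b", "v")])])

def Spec_apply_mojibake_fixes (rows : List (List (String × String))) (edits : List (Int × List (String × String))) (out : List (List (String × String))) : Prop := out = apply_mojibake_fixes_alt rows edits
instance (rows : List (List (String × String))) (edits : List (Int × List (String × String))) (out : List (List (String × String))) : Decidable (Spec_apply_mojibake_fixes rows edits out) := by unfold Spec_apply_mojibake_fixes; infer_instance

-- ===== CLAIM (what is proved, stated in full; the proofs are below) =====
def Claim_equal_apply_mojibake_fixes : Prop := ∀ (rows : List (List (String × String))) (edits : List (Int × List (String × String))), Dom_apply_mojibake_fixes rows edits → Pre_apply_mojibake_fixes rows edits → Spec_apply_mojibake_fixes rows edits (apply_mojibake_fixes rows edits)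

-- ===== LEMMAS AND PROOFS =====

-- lookup in an assoc list with no matching key
theorem pvGet?_mk_eq_none {ν : Type} (l : List (Int × ν)) (k : Int) (h : k ∉ l.map Prod.fst) :
    (PySem.Dict.mk l).get? k = none := by
  induction l with
  | nil => simp [PySem.Dict.get?]
  | cons p rest ih =>
    rw [List.map_cons, List.mem_cons] at h
    have hne : (p.1 == k) = false := beq_eq_false_iff_ne.mpr (fun e => h (Or.inl e.symm))
    rw [PySem.Dict.get?_mk_cons, hne]
    simpa using ih (fun m => h (Or.inr m))

-- The heart of the proof: the i-th element of A's fold is the i-th row with the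
-- (unique, if any) edit for row number i+2 applied.
theorem pvFold_getElem? (edits : List (Int × List (String × String)))
    (hnd : (edits.map Prod.fst).Nodup) (rows : List (List (String × String))) (i : Nat) :
    (edits.foldl pvStep rows)[i]? =
      (rows[i]?).map (fun row =>
        match (PySem.Dict.mk edits).get? ((i : Int) + 2) with
        | some fes => pvWriteFields row fes
        | none => row) := by
  induction edits generalizing rows with
  | nil =>
    simp [PySem.Dict.get?]
  | cons p rest ih =>
    obtain ⟨rn, fes⟩ := p
    simp only [List.map_cons, List.nodup_cons] at hnd
    obtain ⟨hrn, hrest⟩ := hnd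
    simp only [List.foldl_cons]
    rw [ih hrest]
    rw [PySem.Dict.get?_mk_cons]
    unfold pvStep
    by_cases hin : 0 ≤ rn - 2 ∧ rn - 2 < (rows.length : Int)
    · rw [if_pos hin]
      have hn : ((rn - 2).toNat : Int) = rn - 2 := Int.toNat_of_nonneg hin.1
      have hnlen : (rn - 2).toNat < rows.length := by omega
      by_cases hi : i = (rn - 2).toNat
      · rw [hi]
        have heq : (rn == ((((rn - 2).toNat : Nat) : Int) + 2)) = true := by
          rw [beq_iff_eq]; omega
        have hnone : (PySem.Dict.mk rest).get? ((((rn - 2).toNat : Nat) : Int) + 2) = none := by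
          apply pvGet?_mk_eq_none
          intro hmem
          apply hrn
          have : ((((rn - 2).toNat : Nat) : Int) + 2) = rn := by omega
          rwa [this] at hmem
        rw [List.getElem?_set_self (by omega), List.getElem?_eq_getElem hnlen]
        rw [hnone, heq]
        simp only [Option.map_some]
        congr 2
        rw [List.getD_eq_getElem?_getD, List.getElem?_eq_getElem hnlen]
        rfl
      · rw [List.getElem?_set_ne (fun e => hi e.symm)]
        have hne : (rn == (i : Int) + 2) = false := by
          rw [beq_eq_false_iff_ne]
          omega
        rw [hne]
        simp
    · rw [if_neg hin]
      cases hlt : rows[i]? with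
      | none => simp
      | some row =>
        have hilen : i < rows.length := by
          rcases Nat.lt_or_ge i rows.length with h | h
          · exact h
          · rw [List.getElem?_eq_none h] at hlt; simp at hlt
        have hne : (rn == (i : Int) + 2) = false := by
          rw [beq_eq_false_iff_ne]
          intro h
          exact hin ⟨by omega, by omega⟩
        rw [hne]
        simp

-- ===== VERDICT (by name: the statement is the Claim_ definition above) =====
theorem apply_mojibake_fixes_spec : Claim_equal_apply_mojibake_fixes := by
  intro rows edits _ hpre
  unfold Spec_apply_mojibake_fixes apply_mojibake_fixes apply_mojibake_fixes_alt
  apply List.ext_getElem?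
  intro i
  rw [pvFold_getElem? edits hpre rows i]
  rw [List.getElem?_mapIdx]
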